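-- pv_equiv track=rewrite | github.com/fulopmarci2003/Emelt-erettsegi | 2016_majus/otszaz.py | osszeg_counter
-- ===== SOURCE A (Python) =====
-- def osszeg_counter(array):
--     output = 0
--     set_array = set(array)
--     for product in array:
--         if product in set_array:
--             if array.count(product) == 1:
--                 output += 500
--             elif array.count(product) == 2:
--                 output += 950
--             else:
--                 output += 950 + 400 * (array.count(product) - 2)
--             set_array.remove(product)
--     return output
-- ===== SOURCE B (Python) =====
-- def osszeg_counter(array):
--     counts = {}
--     for x in array:
--         counts[x] = counts.get(x, 0) + 1
--     singles = sum(1 for c in counts.values() if c == 1)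
--     multi = len(counts) - singles
--     return 500 * singles + 400 * (len(array) - singles) + 150 * multi
-- ===== Notes on version B (the rewrite author's own statement) =====
-- stated objective: faster
-- what changed: Replaced the per-element loop that re-scans the list with array.count and mutates a set by a single counting pass plus one closed-form arithmetic expression over aggregates (singles, distinct, length).
import Mathlib
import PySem

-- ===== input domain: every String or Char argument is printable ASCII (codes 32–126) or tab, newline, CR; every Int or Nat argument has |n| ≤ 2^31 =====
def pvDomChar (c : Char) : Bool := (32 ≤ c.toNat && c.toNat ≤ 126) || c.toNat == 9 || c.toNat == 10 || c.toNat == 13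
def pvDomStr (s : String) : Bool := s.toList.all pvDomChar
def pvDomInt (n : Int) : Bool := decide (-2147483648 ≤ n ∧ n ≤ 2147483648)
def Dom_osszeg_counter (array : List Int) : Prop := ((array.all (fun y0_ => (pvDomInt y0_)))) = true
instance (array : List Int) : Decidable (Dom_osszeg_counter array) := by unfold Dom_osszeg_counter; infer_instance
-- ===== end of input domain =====

-- B replaces A's quadratic loop (array.count per element, set mutation) by one counting
-- pass and a closed-form arithmetic expression over aggregates; objective: faster (asymptotic).

-- ===== PORT A =====
def osszeg_counter (array : List Int) : Int :=
  -- output = 0; set_array = set(array); for product in array: …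
  (array.foldl (fun st product =>
      if PySem.Set.contains st.2 product then
        let c : Int := (PySem.List.count array product : Int)
        let out : Int :=
          if c == 1 then st.1 + 500
          else if c == 2 then st.1 + 950
          else st.1 + (950 + 400 * (c - 2))
        -- set_array.remove(product): under the membership guard remove? = some (discard), exact
        (out, PySem.Set.discard st.2 product)
      else st)
    ((0 : Int), PySem.Set.ofList array)).1

-- ===== PORT B =====
def osszeg_counter_alt (array : List Int) : Int :=
  let counts : PySem.Dict Int Int :=
    array.foldl (fun d x => d.insert x (d.getD x 0 + 1)) PySem.Dict.empty
  let singles : Int := (counts.values.countP (fun c => c == 1) : Int)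
  let multi : Int := (counts.size : Int) - singles
  500 * singles + 400 * ((array.length : Int) - singles) + 150 * multi

-- ===== PRECONDITION & SPEC =====
def Spec_osszeg_counter (array : List Int) (out : Int) : Prop := out = osszeg_counter_alt array
instance (array : List Int) (out : Int) : Decidable (Spec_osszeg_counter array out) := by unfold Spec_osszeg_counter; infer_instance

-- ===== CLAIM (what is proved, stated in full; the proofs are below) =====
def Claim_equal_osszeg_counter : Prop := ∀ (array : List Int), Dom_osszeg_counter array → Spec_osszeg_counter array (osszeg_counter array)

-- ===== LEMMAS AND PROOFS =====

-- per-distinct-value score A adds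
def pvScore (c : Int) : Int :=
  if c == 1 then 500 else if c == 2 then 950 else 950 + 400 * (c - 2)

-- splitting off one present element from the "occurs in x :: t" filter-sum
theorem pvSplit (g : Int → Int) (x : Int) (t : List Int) :
    ∀ (s : List Int), s.Nodup → x ∈ s →
    ((s.filter (fun y => (x :: t).contains y)).map g).sum
      = g x + (((s.filter (fun y => !(y == x))).filter (fun y => t.contains y)).map g).sum := by
  intro s
  induction s with
  | nil => intro _ h; simp at h
  | cons a w ih =>
    intro hnd hx
    have hw : w.Nodup := (List.nodup_cons.mp hnd).2
    by_cases hax : a = x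
    · subst hax
      have haw : a ∉ w := (List.nodup_cons.mp hnd).1
      have h1 : w.filter (fun y => (a :: t).contains y) = w.filter (fun y => t.contains y) := by
        apply List.filter_congr; intro y hy
        have hya : y ≠ a := fun h => haw (h ▸ hy)
        simp [hya]
      have h2 : w.filter (fun y => !(y == a)) = w := by
        apply List.filter_eq_self.mpr; intro y hy
        have hya : y ≠ a := fun h => haw (h ▸ hy)
        simp [hya]
      have e1 : (a :: w).filter (fun y => (a :: t).contains y)
          = a :: w.filter (fun y => (a :: t).contains y) := by
        rw [List.filter_cons]; simp
      have e2 : (a :: w).filter (fun y => !(y == a)) = w.filter (fun y => !(y == a)) := by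
        rw [List.filter_cons]; simp
      rw [e1, h1, e2, h2]
      simp
    · have hxw : x ∈ w := by
        rcases List.mem_cons.mp hx with h | h
        · exact absurd h.symm hax
        · exact h
      have hrec := ih hw hxw
      have e2 : (a :: w).filter (fun y => !(y == x)) = a :: w.filter (fun y => !(y == x)) := by
        rw [List.filter_cons]; simp [hax]
      by_cases hat : a ∈ t
      · have e1 : (a :: w).filter (fun y => (x :: t).contains y)
            = a :: w.filter (fun y => (x :: t).contains y) := by
          rw [List.filter_cons]; simp [hat]
        have e3 : (a :: w.filter (fun y => !(y == x))).filter (fun y => t.contains y)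
            = a :: (w.filter (fun y => !(y == x))).filter (fun y => t.contains y) := by
          rw [List.filter_cons]; simp [hat]
        rw [e1, e2, e3]
        simp only [List.map_cons, List.sum_cons, hrec]
        ring
      · have e1 : (a :: w).filter (fun y => (x :: t).contains y)
            = w.filter (fun y => (x :: t).contains y) := by
          rw [List.filter_cons]; simp [hat, hax]
        have e3 : (a :: w.filter (fun y => !(y == x))).filter (fun y => t.contains y)
            = (w.filter (fun y => !(y == x))).filter (fun y => t.contains y) := by
          rw [List.filter_cons]; simp [hat]
        rw [e1, e2, e3]
        exact hrec

-- A's loop: each element of s that occurs in l contributes g of itself exactly once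
theorem pvLoopA (g : Int → Int) (l : List Int) :
    ∀ (s : PySem.Set Int) (out : Int), s.Nodup →
    (l.foldl (fun st x =>
        if PySem.Set.contains st.2 x then (st.1 + g x, PySem.Set.discard st.2 x) else st)
      (out, s)).1
    = out + ((s.filter (fun y => l.contains y)).map g).sum := by
  induction l with
  | nil => intro s out _; simp
  | cons x t ih =>
    intro s out hnd
    by_cases hx : x ∈ s
    · have hc : PySem.Set.contains s x = true := by
        simpa [PySem.Set.contains] using hx
      have hnd' : (PySem.Set.discard s x).Nodup := List.Nodup.filter _ hnd
      simp only [List.foldl_cons, hc, if_pos]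
      rw [ih _ _ hnd']
      have hdis : PySem.Set.discard s x = s.filter (fun y => !(y == x)) := rfl
      rw [hdis, pvSplit g x t s hnd hx]
      ring
    · have hc : PySem.Set.contains s x = false := by
        simp [PySem.Set.contains]; exact fun h => hx h
      simp only [List.foldl_cons, hc, if_neg, Bool.false_eq_true, not_false_iff]
      rw [ih _ _ hnd]
      have : s.filter (fun y => (x :: t).contains y) = s.filter (fun y => t.contains y) := by
        apply List.filter_congr
        intro y hy
        have : y ≠ x := fun h => hx (h ▸ hy)
        simp [this]
      rw [this]

-- A equals the sum of pvScore over the distinct values' multiplicities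
theorem pvA_eq_sum (array : List Int) :
    osszeg_counter array
    = (((PySem.Set.ofList array).map (fun k => ((array.count k : Nat) : Int))).map pvScore).sum := by
  have h := pvLoopA (fun x => pvScore ((array.count x : Nat) : Int)) array
      (PySem.Set.ofList array) 0 (PySem.Set.nodup_ofList array)
  have hfilter : (PySem.Set.ofList array).filter (fun y => array.contains y)
      = PySem.Set.ofList array := by
    apply List.filter_eq_self.mpr
    intro y hy
    have : y ∈ array := (PySem.Set.mem_ofList array y).mp hy
    simpa using this
  have hA : osszeg_counter array
      = ((PySem.Set.ofList array).map (fun x => pvScore ((array.count x : Nat) : Int))).sum := by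
    unfold osszeg_counter
    rw [show (fun (st : Int × PySem.Set Int) (product : Int) =>
        if PySem.Set.contains st.2 product then
          let c : Int := (PySem.List.count array product : Int)
          let out : Int :=
            if c == 1 then st.1 + 500
            else if c == 2 then st.1 + 950
            else st.1 + (950 + 400 * (c - 2))
          (out, PySem.Set.discard st.2 product)
        else st)
      = (fun (st : Int × PySem.Set Int) (x : Int) =>
          if PySem.Set.contains st.2 x
          then (st.1 + pvScore ((array.count x : Nat) : Int), PySem.Set.discard st.2 x)
          else st) from by
        funext st x
        simp only [PySem.List.count, pvScore]
        split_ifs <;> simp_all]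
    rw [h, hfilter]
    simp
  rw [hA, List.map_map]
  rfl

-- closed form for the sum of pvScore over a list of positive counts
theorem pvClosedForm : ∀ (v : List Int), (∀ c ∈ v, 1 ≤ c) →
    (v.map pvScore).sum
    = 500 * (v.countP (fun c => c == 1) : Int)
      + 400 * (v.sum - (v.countP (fun c => c == 1) : Int))
      + 150 * ((v.length : Int) - (v.countP (fun c => c == 1) : Int)) := by
  intro v
  induction v with
  | nil => simp
  | cons c w ih =>
    intro h
    have hc : 1 ≤ c := h c (List.mem_cons_self)
    have hrec := ih (fun x hx => h x (List.mem_cons_of_mem _ hx))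
    simp only [List.map_cons, List.sum_cons, List.countP_cons, List.length_cons, List.sum_cons,
      hrec, pvScore]
    by_cases h1 : c = 1
    · subst h1; norm_num; ring
    · by_cases h2 : c = 2
      · subst h2; norm_num; ring
      · have hb1 : (c == 1) = false := by simp [h1]
        have hb2 : (c == 2) = false := by simp [h2]
        simp only [hb1, hb2, if_false, Bool.false_eq_true]
        push_cast
        ring

-- the multiplicities over the distinct values sum to the length
theorem pvSumCounts (array : List Int) :
    ((PySem.Set.ofList array).map (fun k => ((array.count k : Nat) : Int))).sum
    = (array.length : Int) := by
  have hperm : (PySem.Set.ofList array).Perm array.dedup := by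
    apply (List.perm_ext_iff_of_nodup (PySem.Set.nodup_ofList array) array.nodup_dedup).mpr
    intro a
    rw [PySem.Set.mem_ofList, List.mem_dedup]
  have hmap := hperm.map (fun k => ((array.count k : Nat) : Int))
  have := hmap.sum_eq
  rw [this]
  have hnat := List.sum_map_count_dedup_eq_length array
  have : (array.dedup.map (fun k => ((array.count k : Nat) : Int))).sum
      = (((array.dedup.map (fun k => (array.count k : Nat))).sum : Nat) : Int) := by
    induction array.dedup with
    | nil => simp
    | cons a w ihw => simp [ihw]
  rw [this]
  exact_mod_cast hnat

-- ===== VERDICT (by name: the statement is the Claim_ definition above) =====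
theorem osszeg_counter_spec : Claim_equal_osszeg_counter := by
  intro array _
  show osszeg_counter array = osszeg_counter_alt array
  rw [pvA_eq_sum]
  set v : List Int := (PySem.Set.ofList array).map (fun k => ((array.count k : Nat) : Int)) with hv
  have hpos : ∀ c ∈ v, 1 ≤ c := by
    intro c hcv
    rcases List.mem_map.mp hcv with ⟨k, hk, rfl⟩
    have hkmem : k ∈ array := (PySem.Set.mem_ofList array k).mp hk
    have : 1 ≤ array.count k := List.one_le_count_iff.mpr hkmem
    exact_mod_cast this
  rw [pvClosedForm v hpos]
  have hsum : v.sum = (array.length : Int) := pvSumCounts array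
  have hcounter : (array.foldl (fun d x => d.insert x (d.getD x 0 + 1)) PySem.Dict.empty)
      = PySem.Dict.counter array := PySem.Dict.foldl_insert_getD_add_one_eq_counter array
  have hvals : (PySem.Dict.counter array).values = v := by
    have := PySem.Dict.items_counter array
    show (PySem.Dict.counter array).items.map (·.2) = v
    rw [this, List.map_map, hv]
    rfl
  have hsize : ((PySem.Dict.counter array).size : Int) = (v.length : Int) := by
    show (((PySem.Dict.counter array).items.length : Nat) : Int) = _
    have : (PySem.Dict.counter array).items.length
        = ((PySem.Dict.counter array).items.map (·.2)).length := by simp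
    rw [this]
    have h2 : (PySem.Dict.counter array).items.map (·.2) = v := hvals
    rw [h2]
  unfold osszeg_counter_alt
  rw [hcounter]
  simp only [hvals, hsize, hsum]
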